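-- pv_equiv track=rewrite | github.com/sangeon22/CodingTest | 프로그래머스/unrated/181890. 왼쪽 오른쪽/왼쪽 오른쪽.py | solution
-- ===== SOURCE A (Python) =====
-- def solution(s):
--     answer = []
--     if "l" not in s and "r" not in s:
--         return []
--     for i in range(len(s)):
--         if s[i] == "l":
--             return s[:i]
--         elif s[i] == "r":
--             return s[i+1:]
-- ===== SOURCE B (Python) =====
-- def solution(s):
--     it = iter(s)
--     acc = []
--     for ch in it:
--         if ch == "l":
--             return acc
--         if ch == "r":
--             return list(it)
--         acc.append(ch)
--     return []
-- ===== Notes on version B (the rewrite author's own statement) =====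
-- stated objective: alternative
-- what changed: Replaced the index-based scan with slicing by a single consuming pass over an iterator that builds the prefix in an accumulator: on 'l' it returns the accumulated prefix, on 'r' it drains the rest of the iterator; no indices, slices or membership pre-test.
import Mathlib
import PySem

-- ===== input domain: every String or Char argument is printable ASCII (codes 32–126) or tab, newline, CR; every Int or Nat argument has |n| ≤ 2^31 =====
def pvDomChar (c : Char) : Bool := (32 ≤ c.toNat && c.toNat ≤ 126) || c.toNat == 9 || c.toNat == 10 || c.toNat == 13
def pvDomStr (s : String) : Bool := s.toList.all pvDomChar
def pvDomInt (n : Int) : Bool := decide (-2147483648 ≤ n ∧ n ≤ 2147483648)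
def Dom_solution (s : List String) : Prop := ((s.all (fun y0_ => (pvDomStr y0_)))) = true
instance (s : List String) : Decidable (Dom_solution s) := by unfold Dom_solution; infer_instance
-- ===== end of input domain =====

-- B replaces A's index scan + slices with one consuming pass carrying an accumulated prefix (alternative decomposition; same cost).

-- ===== PORT A =====
-- the 'for i in range(len(s))' loop of A, resumed at index i
def solutionLoop (s : List String) (i : Nat) : List String :=
  if h : i < s.length then
    if s[i] = "l" then PySem.List.slice s none (some (i : Int))
    else if s[i] = "r" then PySem.List.slice s (some ((i : Int) + 1)) none
    else solutionLoop s (i + 1)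
  else []   -- unreachable: A only reaches the loop when "l" or "r" occurs, so it always returns inside
termination_by s.length - i

def solution (s : List String) : List String :=
  if "l" ∉ s ∧ "r" ∉ s then [] else solutionLoop s 0

-- ===== PORT B =====
-- the 'for ch in it' loop of B: consumes the rest of the iterator, acc is the prefix built so far
def solutionAltGo : List String → List String → List String
  | [], _acc => []
  | h :: t, acc => if h = "l" then acc else if h = "r" then t else solutionAltGo t (acc ++ [h])

def solution_alt (s : List String) : List String := solutionAltGo s []

-- ===== PRECONDITION & SPEC =====
def Spec_solution (s : List String) (out : List String) : Prop := out = solution_alt s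
instance (s : List String) (out : List String) : Decidable (Spec_solution s out) := by unfold Spec_solution; infer_instance

-- ===== CLAIM (what is proved, stated in full; the proofs are below) =====
def Claim_equal_solution : Prop := ∀ (s : List String), Dom_solution s → Spec_solution s (solution s)

-- ===== LEMMAS AND PROOFS =====

-- when neither letter occurs, B's loop falls through to []
theorem go_none (l acc : List String) (hl : "l" ∉ l) (hr : "r" ∉ l) :
    solutionAltGo l acc = [] := by
  induction l generalizing acc with
  | nil => rfl
  | cons h t ih =>
    simp only [List.mem_cons, not_or] at hl hr
    rw [solutionAltGo, if_neg (by simpa using Ne.symm hl.1), if_neg (by simpa using Ne.symm hr.1)]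
    exact ih (acc ++ [h]) hl.2 hr.2

-- A's loop from index i computes B's loop on (drop i) with the prefix (take i) accumulated
theorem loop_eq_go (s : List String) (i : Nat) :
    solutionLoop s i = solutionAltGo (s.drop i) (s.take i) := by
  induction hn : s.length - i generalizing i with
  | zero =>
    have hi : s.length ≤ i := by omega
    rw [solutionLoop, dif_neg (by omega), List.drop_eq_nil_of_le hi]
    rfl
  | succ n ih =>
    have hi : i < s.length := by omega
    have hdrop : s.drop i = s[i] :: s.drop (i + 1) := (List.getElem_cons_drop hi).symm
    rw [solutionLoop, dif_pos hi, hdrop, solutionAltGo]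
    by_cases hl : s[i] = "l"
    · rw [if_pos hl, if_pos hl, PySem.List.slice_to_natCast]
    · rw [if_neg hl, if_neg hl]
      by_cases hr : s[i] = "r"
      · rw [if_pos hr, if_pos hr]
        have : ((i : Int) + 1) = ((i + 1 : Nat) : Int) := by push_cast; ring
        rw [this, PySem.List.slice_from_natCast]
      · rw [if_neg hr, if_neg hr]
        have htake : s.take i ++ [s[i]] = s.take (i + 1) := by
          rw [List.take_add_one, List.getElem?_eq_getElem hi]; rfl
        rw [htake]
        exact ih (i + 1) (by omega)

-- ===== VERDICT (by name: the statement is the Claim_ definition above) =====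
theorem solution_spec : Claim_equal_solution := by
  intro s _
  unfold Spec_solution solution solution_alt
  by_cases h : "l" ∉ s ∧ "r" ∉ s
  · rw [if_pos h, go_none s [] h.1 h.2]
  · rw [if_neg h, loop_eq_go s 0]
    rfl
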